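-- pv_equiv track=rewrite | github.com/pypi-data/pypi-mirror-195 | packages/agh-vqis/agh_vqis-2.0.3.tar.gz/agh_vqis-2.0.3/src/agh_vqis/__main__.py | _get_selected_vqis
-- ===== SOURCE A (Python) =====
-- def _get_selected_vqis(options: dict) -> int:
--     vqis = {
--         'blockiness': 1,
--         'sa': 2,
--         'letterbox': 4,
--         'pillarbox': 8,
--         'blockloss': 16,
--         'blur': 32,
--         'ta': 64,
--         'blackout': 128,
--         'freezing': 256,
--         'exposure': 512,
--         'contrast': 1024,
--         'interlace': 2048,
--         'noise': 4096,
--         'slice': 8192,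
--         'flickering': 16384
--     }
--
--     # selected_vqis = sum(vqis.values())
--     selected_vqis = 32767  # select all by default
--
--     for key, value in options.items():
--         if not value:
--             try:
--                 selected_vqis -= vqis[key]  # remove vqis
--             except KeyError:
--                 pass
--
--     return selected_vqis
-- ===== SOURCE B (Python) =====
-- def _get_selected_vqis(options: dict) -> int:
--     # order fixes the bit: key i <-> bit 2**i
--     keys = ['blockiness', 'sa', 'letterbox', 'pillarbox', 'blockloss',
--             'blur', 'ta', 'blackout', 'freezing', 'exposure',
--             'contrast', 'interlace', 'noise', 'slice', 'flickering']
--     return sum(2 ** i for i, key in enumerate(keys) if options.get(key, True))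
-- ===== Notes on version B (the rewrite author's own statement) =====
-- stated objective: simpler
-- what changed: B replaces the name->bit dict, the 32767 sentinel and the subtract-with-try/except loop over options by a plain ordered key list whose index determines the bit (2**i), summing 2**i in one comprehension for every key that is absent from options or truthy.
import Mathlib
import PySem

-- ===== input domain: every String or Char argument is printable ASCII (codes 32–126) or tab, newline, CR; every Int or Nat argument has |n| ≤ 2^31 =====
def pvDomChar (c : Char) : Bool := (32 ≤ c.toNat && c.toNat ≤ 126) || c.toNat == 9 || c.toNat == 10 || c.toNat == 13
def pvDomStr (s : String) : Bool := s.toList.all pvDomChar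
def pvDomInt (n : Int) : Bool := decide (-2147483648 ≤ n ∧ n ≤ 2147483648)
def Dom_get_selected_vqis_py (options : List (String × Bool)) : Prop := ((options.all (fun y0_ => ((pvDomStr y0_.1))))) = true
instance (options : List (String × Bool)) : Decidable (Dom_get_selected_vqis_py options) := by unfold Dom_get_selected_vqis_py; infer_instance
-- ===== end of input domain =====

-- B drops the name->bit dict, the 32767 sentinel and the subtract-with-try/except loop: an ordered
-- key list fixes bit 2^i by position and one comprehension sums the bits of absent-or-truthy keys;
-- equivalence proved for duplicate-free association lists (the only ones representing a Python dict).


-- ===== PORT A =====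
def vqisTableA : PySem.Dict String Int := PySem.Dict.ofList
  [("blockiness", 1), ("sa", 2), ("letterbox", 4), ("pillarbox", 8), ("blockloss", 16),
   ("blur", 32), ("ta", 64), ("blackout", 128), ("freezing", 256), ("exposure", 512),
   ("contrast", 1024), ("interlace", 2048), ("noise", 4096), ("slice", 8192), ("flickering", 16384)]

def get_selected_vqis_py (options : List (String × Bool)) : Int :=
  options.foldl (fun selected kv =>
    if kv.2 = false then
      match vqisTableA.get? kv.1 with      -- try: selected -= vqis[key] except KeyError: pass
      | some b => selected - b
      | none => selected
    else selected) 32767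

-- ===== PORT B =====
def vqisKeys : List String :=
  ["blockiness", "sa", "letterbox", "pillarbox", "blockloss",
   "blur", "ta", "blackout", "freezing", "exposure",
   "contrast", "interlace", "noise", "slice", "flickering"]

-- sum(2 ** i for i, key in enumerate(keys) if options.get(key, True));
-- Python's 2 ** i on the nonnegative enumerate index i is (2 : Int) ^ i.toNat, exact here.
def get_selected_vqis_py_alt (options : List (String × Bool)) : Int :=
  (((PySem.List.enumerate vqisKeys).filter
      (fun p => (PySem.Dict.mk options).getD p.2 true)).map
      (fun p => (2 : Int) ^ p.1.toNat)).sum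

-- ===== PRECONDITION & SPEC =====
-- Pre_ excludes association lists with duplicate keys: they do not arise from a Python dict
-- (dict keys are unique), so both ports' values there are artefacts of the list representation.
def Pre_get_selected_vqis_py (options : List (String × Bool)) : Prop :=
  (options.map Prod.fst).Nodup
instance (options : List (String × Bool)) : Decidable (Pre_get_selected_vqis_py options) := by unfold Pre_get_selected_vqis_py; infer_instance

def pvWitness_get_selected_vqis_py : (List (String × Bool)) := [("blockiness", false), ("foo", true)]

def Spec_get_selected_vqis_py (options : List (String × Bool)) (out : Int) : Prop := out = get_selected_vqis_py_alt options
instance (options : List (String × Bool)) (out : Int) : Decidable (Spec_get_selected_vqis_py options out) := by unfold Spec_get_selected_vqis_py; infer_instance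

-- ===== CLAIM (what is proved, stated in full; the proofs are below) =====
def Claim_equal_get_selected_vqis_py : Prop := ∀ (options : List (String × Bool)), Dom_get_selected_vqis_py options → Pre_get_selected_vqis_py options → Spec_get_selected_vqis_py options (get_selected_vqis_py options)

-- ===== LEMMAS AND PROOFS =====

-- proof-only key/bit pair view of the table
def vqisTableB : List (String × Int) :=
  [("blockiness", 1), ("sa", 2), ("letterbox", 4), ("pillarbox", 8), ("blockloss", 16),
   ("blur", 32), ("ta", 64), ("blackout", 128), ("freezing", 256), ("exposure", 512),
   ("contrast", 1024), ("interlace", 2048), ("noise", 4096), ("slice", 8192), ("flickering", 16384)]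

-- the value A subtracts for one options entry
def subBit (kv : String × Bool) : Int :=
  if kv.2 = false then ((PySem.Dict.mk vqisTableB).get? kv.1).getD 0 else 0

-- the value B contributes for one table entry
def addBit (opts : List (String × Bool)) (kb : String × Int) : Int :=
  if (PySem.Dict.mk opts).getD kb.1 true then kb.2 else 0

def SA (opts : List (String × Bool)) : Int := (opts.map subBit).sum

def SB (opts : List (String × Bool)) (L : List (String × Int)) : Int := (L.map (addBit opts)).sum

lemma vqisA_eq_mkB : vqisTableA = PySem.Dict.mk vqisTableB := by decide

lemma foldA_eq (opts : List (String × Bool)) : ∀ (n : Int),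
    opts.foldl (fun selected kv =>
      if kv.2 = false then
        match vqisTableA.get? kv.1 with
        | some b => selected - b
        | none => selected
      else selected) n = n - SA opts := by
  induction opts with
  | nil => intro n; simp [SA]
  | cons kv rest ih =>
    intro n
    rw [List.foldl_cons]
    simp only [SA, List.map_cons, List.sum_cons, subBit, ← vqisA_eq_mkB]
    cases hv : kv.2 <;> cases h : vqisTableA.get? kv.1 <;>
      simp only [if_true, if_false, Bool.true_eq_false, ih, SA, Option.getD_some, Option.getD_none] <;> ring

-- B's filtered comprehension over any indexed list equals the if-then-else sum
lemma filter_map_sum (d : PySem.Dict String Bool) : ∀ (L : List (Int × String)),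
    ((L.filter (fun p => d.getD p.2 true)).map (fun p => (2 : Int) ^ p.1.toNat)).sum
      = (L.map (fun p => if d.getD p.2 true then (2 : Int) ^ p.1.toNat else 0)).sum := by
  intro L
  induction L with
  | nil => rfl
  | cons p L' ih =>
    simp only [List.filter_cons, List.map_cons, List.sum_cons]
    cases h : d.getD p.2 true <;> simp [ih]

lemma enum_keys_eq_table :
    (PySem.List.enumerate vqisKeys).map (fun p => (p.2, (2 : Int) ^ p.1.toNat)) = vqisTableB := by
  decide

lemma altB_eq (opts : List (String × Bool)) :
    get_selected_vqis_py_alt opts = SB opts vqisTableB := by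
  unfold get_selected_vqis_py_alt SB
  rw [filter_map_sum, ← enum_keys_eq_table, List.map_map]
  rfl

lemma getD_mk_cons (k k' : String) (v : Bool) (rest : List (String × Bool)) :
    (PySem.Dict.mk ((k, v) :: rest)).getD k' true
      = if k = k' then v else (PySem.Dict.mk rest).getD k' true := by
  rw [PySem.Dict.getD_eq_get?_getD, PySem.Dict.getD_eq_get?_getD, PySem.Dict.get?_mk_cons]
  by_cases h : k = k' <;> simp [h]

lemma getD_of_not_mem (k : String) (rest : List (String × Bool))
    (h : k ∉ rest.map Prod.fst) : (PySem.Dict.mk rest).getD k true = true := by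
  rw [PySem.Dict.getD_eq_get?_getD]
  have : (PySem.Dict.mk rest).get? k = none := by
    rw [PySem.Dict.get?_eq_none_iff_not_mem_keys]
    simpa [PySem.Dict.keys_mk] using h
  simp [this]

-- consing a fresh key onto opts leaves every table entry with a different key unchanged
lemma SB_cons_skip (k : String) (v : Bool) (rest : List (String × Bool)) :
    ∀ (L : List (String × Int)), k ∉ L.map Prod.fst →
      SB ((k, v) :: rest) L = SB rest L := by
  intro L
  induction L with
  | nil => intro _; rfl
  | cons kb L' ih =>
    intro h
    simp only [List.map_cons, List.mem_cons, not_or] at h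
    simp only [SB, List.map_cons, List.sum_cons] at *
    rw [ih h.2]
    congr 1
    simp only [addBit, getD_mk_cons]
    rw [if_neg h.1]

lemma SB_cons (k : String) (v : Bool) (rest : List (String × Bool))
    (hk : k ∉ rest.map Prod.fst) :
    ∀ (L : List (String × Int)), (L.map Prod.fst).Nodup →
      SB ((k, v) :: rest) L
        = SB rest L - (if v = false then ((PySem.Dict.mk L).get? k).getD 0 else 0) := by
  intro L
  induction L with
  | nil => intro _; simp [SB, PySem.Dict.get?]
  | cons kb L' ih =>
    intro hnd
    simp only [List.map_cons, List.nodup_cons] at hnd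
    by_cases hkk : kb.1 = k
    · -- the (unique) table entry for k: its term flips from `true` to `v`
      have hnot : k ∉ L'.map Prod.fst := hkk ▸ hnd.1
      simp only [SB, List.map_cons, List.sum_cons]
      have hskip := SB_cons_skip k v rest L' hnot
      simp only [SB] at hskip
      rw [hskip, PySem.Dict.get?_mk_cons]
      simp only [addBit, getD_mk_cons, hkk, getD_of_not_mem k rest hk, beq_iff_eq, if_true]
      cases v <;> simp
    · -- a different key: term unchanged, recurse
      have hterm : addBit ((k, v) :: rest) kb = addBit rest kb := by
        simp only [addBit, getD_mk_cons]
        rw [if_neg (Ne.symm hkk)]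
      have hne : (kb.1 == k) = false := by simpa using hkk
      simp only [SB, List.map_cons, List.sum_cons] at ih ⊢
      rw [hterm, ih hnd.2, PySem.Dict.get?_mk_cons, hne]
      simp only [Bool.false_eq_true, if_false]
      ring

lemma main_sum (opts : List (String × Bool)) :
    (opts.map Prod.fst).Nodup → SB opts vqisTableB = 32767 - SA opts := by
  induction opts with
  | nil => intro _; decide
  | cons kv rest ih =>
    intro hnd
    simp only [List.map_cons, List.nodup_cons] at hnd
    obtain ⟨k, v⟩ := kv
    rw [SB_cons k v rest hnd.1 vqisTableB (by decide), ih hnd.2]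
    simp only [SA, List.map_cons, List.sum_cons, subBit]
    ring

-- ===== VERDICT (by name: the statement is the Claim_ definition above) =====
theorem get_selected_vqis_py_spec : Claim_equal_get_selected_vqis_py := by
  intro options _ hpre
  unfold Spec_get_selected_vqis_py get_selected_vqis_py
  rw [altB_eq, foldA_eq, main_sum options hpre]
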